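-- pv_equiv track=rewrite | github.com/kleelab-bch/FNA | evaluation/explore_data.py | get_images_by_subject
-- ===== SOURCE A (Python) =====
-- def get_images_by_subject(image_names):
--     # find unique subject id from list of image names
--     unique_subjects = set()
--     images_by_subject = {}
--     for image_name in image_names:
--         unique_subjects.add(image_name[:6])  # duplicate name will be ignored in the set
--         if image_name[:6] not in images_by_subject:
--             images_by_subject[image_name[:6]] = []
--         images_by_subject[image_name[:6]].append(image_name)
--
--     return images_by_subject
-- ===== SOURCE B (Python) =====
-- def get_images_by_subject(image_names):
--     # two declarative passes: ordered-dedup the 6-char prefixes, then one filter per prefix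
--     prefixes = list(dict.fromkeys(name[:6] for name in image_names))
--     return {p: [n for n in image_names if n[:6] == p] for p in prefixes}
-- ===== Notes on version B (the rewrite author's own statement) =====
-- stated objective: alternative
-- what changed: Replaces the single-pass mutable-dict build (membership test + append per name) with two declarative passes: an ordered dedup of the 6-char prefixes, then one filter comprehension per prefix.
import Mathlib
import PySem

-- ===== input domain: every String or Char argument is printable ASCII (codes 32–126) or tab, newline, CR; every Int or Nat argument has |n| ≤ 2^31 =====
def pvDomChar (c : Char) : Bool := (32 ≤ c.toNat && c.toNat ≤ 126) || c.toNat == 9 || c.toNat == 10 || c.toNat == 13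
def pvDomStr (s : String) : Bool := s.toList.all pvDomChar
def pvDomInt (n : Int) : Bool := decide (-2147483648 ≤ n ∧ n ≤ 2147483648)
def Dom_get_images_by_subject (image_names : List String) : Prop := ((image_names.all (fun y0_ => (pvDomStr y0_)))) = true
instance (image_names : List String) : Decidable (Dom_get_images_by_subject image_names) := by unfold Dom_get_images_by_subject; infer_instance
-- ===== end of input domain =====

-- B replaces A's single-pass mutable-dict build with two declarative passes (ordered
-- dedup of the 6-char prefixes, then one filter per prefix); same return value, no speed claim.

-- ===== PORT A =====
-- one loop iteration of A: add the prefix to the set, ensure the dict entry exists, append the name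
def pvAStep (st : PySem.Set String × PySem.Dict String (List String)) (image_name : String) :
    PySem.Set String × PySem.Dict String (List String) :=
  let pre := PySem.Str.slice image_name none (some 6)
  let s := PySem.Set.add st.1 pre
  let d := if st.2.contains pre then st.2 else st.2.insert pre []
  (s, d.modify pre [] (fun l => l ++ [image_name]))

def get_images_by_subject (image_names : List String) : List (String × List String) :=
  (image_names.foldl pvAStep (([] : PySem.Set String), PySem.Dict.empty)).2.items

-- ===== PORT B =====
def pvKey (n : String) : String := PySem.Str.slice n none (some 6)

def get_images_by_subject_alt (image_names : List String) : List (String × List String) :=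
  let prefixes := PySem.List.dedup (image_names.map pvKey)
  prefixes.map (fun p => (p, image_names.filter (fun n => pvKey n == p)))

-- ===== PRECONDITION & SPEC =====
def Spec_get_images_by_subject (image_names : List String) (out : List (String × List String)) : Prop := out = get_images_by_subject_alt image_names
instance (image_names : List String) (out : List (String × List String)) : Decidable (Spec_get_images_by_subject image_names out) := by unfold Spec_get_images_by_subject; infer_instance

-- ===== CLAIM (what is proved, stated in full; the proofs are below) =====
def Claim_equal_get_images_by_subject : Prop := ∀ (image_names : List String), Dom_get_images_by_subject image_names → Spec_get_images_by_subject image_names (get_images_by_subject image_names)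

-- ===== LEMMAS AND PROOFS =====

-- A's "if key missing, insert []; then append" is one modify with default []
theorem pvStep_eq (d : PySem.Dict String (List String)) (k : String) (f : List String → List String) :
    (if d.contains k then d else d.insert k []).modify k [] f = d.modify k [] f := by
  by_cases h : d.contains k
  · simp [h]
  · have hc : d.contains k = false := by simpa using h
    simp only [h, Bool.false_eq_true, if_false, PySem.Dict.modify]
    rw [PySem.Dict.getD_insert_self, PySem.Dict.insert_insert_self]
    simp [pysem, hc]

-- the dict component of A's fold ignores the set component
theorem pvFold_snd (l : List String) (s : PySem.Set String)
    (d : PySem.Dict String (List String)) :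
    (l.foldl pvAStep (s, d)).2
      = l.foldl (fun d n => d.modify (pvKey n) [] (fun v => v ++ [n])) d := by
  induction l generalizing s d with
  | nil => rfl
  | cons x xs ih =>
      simp only [List.foldl_cons, pvAStep]
      rw [ih, pvStep_eq]
      rfl

theorem pvFold_as_pairs (l : List String) :
    l.foldl (fun d n => d.modify (pvKey n) [] (fun v => v ++ [n])) PySem.Dict.empty
      = (l.map (fun n => (pvKey n, n))).foldl
          (fun d p => d.modify p.1 [] (fun v => v ++ [p.2])) PySem.Dict.empty := by
  rw [List.foldl_map]

-- ===== VERDICT (by name: the statement is the Claim_ definition above) =====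
theorem get_images_by_subject_spec : Claim_equal_get_images_by_subject := by
  intro l _
  show _ = _
  unfold get_images_by_subject get_images_by_subject_alt
  rw [pvFold_snd, pvFold_as_pairs]
  set D := (l.map (fun n => (pvKey n, n))).foldl
      (fun d p => d.modify p.1 [] (fun v => v ++ [p.2])) PySem.Dict.empty with hD
  have hkeys : D.keys = PySem.Set.ofList (l.map pvKey) := by
    rw [hD, List.foldl_map]
    rw [PySem.Dict.keys_foldl_modify_key l pvKey [] (fun _ n v => v ++ [n]) PySem.Dict.empty]
    simp [PySem.Set.update_nil_left, PySem.Dict.keys_empty]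
  have hnd : D.keys.Nodup := by rw [hkeys]; exact PySem.Set.nodup_ofList _
  rw [PySem.Dict.items_eq_map_keys D hnd []]
  rw [hkeys]
  simp only [PySem.List.dedup_eq_ofList]
  apply List.map_congr_left
  intro p _
  congr 1
  rw [hD, PySem.Dict.getD_foldl_modify_append]
  simp only [PySem.Dict.getD_empty, List.nil_append]
  rw [List.filter_map, List.map_map]
  simp [Function.comp_def]
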